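-- pv_equiv track=rewrite | github.com/Brady-Brandt/MinBool | minbool.py | __to_pos
-- ===== SOURCE A (Python) =====
-- def __to_pos(implicant_chart: dict[str, str]) -> set[tuple[int]]:
--     temp_pos = {}
--     for implicant_index,(_,value) in enumerate(implicant_chart.items()):
--         for col, bit in enumerate(value):
--             # ensure all our numbers are multiples of 2
--             temp_item = 2**implicant_index
--
--             if bit == '1':
--                 try:
--                     temp_pos[col].append(temp_item)
--                 except KeyError:
--                     temp_pos[col] = [temp_item]
--
--     pos_res = set()
--     for _, sum in temp_pos.items():
--         pos_res.add(tuple(sum))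
--
--     return pos_res
-- ===== SOURCE B (Python) =====
-- def __to_pos(implicant_chart: dict[str, str]) -> set[tuple[int]]:
--     # Represent each column's set of covering implicants as one integer bitmask
--     # (bit i set iff row i has a '1' in that column), then expand each bitmask
--     # into its tuple of powers of two at the end.
--     masks = {}
--     for i, value in enumerate(implicant_chart.values()):
--         for col, bit in enumerate(value):
--             if bit == '1':
--                 masks[col] = masks.get(col, 0) + 2 ** i
--     pos_res = set()
--     for mask in masks.values():
--         bits = []
--         p = 1
--         while mask:
--             if mask % 2:
--                 bits.append(p)
--             mask //= 2
--             p *= 2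
--         pos_res.add(tuple(bits))
--     return pos_res
-- ===== Notes on version B (the rewrite author's own statement) =====
-- stated objective: alternative
-- what changed: Replaces the dict-of-lists accumulator (grow each column's list of powers row by row, then emit the lists as tuples) by a dict of integer bitmasks: each '1' cell adds 2**row to its column's single integer, and each mask is expanded back into its tuple of powers by a halving loop at the end.
import Mathlib
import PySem

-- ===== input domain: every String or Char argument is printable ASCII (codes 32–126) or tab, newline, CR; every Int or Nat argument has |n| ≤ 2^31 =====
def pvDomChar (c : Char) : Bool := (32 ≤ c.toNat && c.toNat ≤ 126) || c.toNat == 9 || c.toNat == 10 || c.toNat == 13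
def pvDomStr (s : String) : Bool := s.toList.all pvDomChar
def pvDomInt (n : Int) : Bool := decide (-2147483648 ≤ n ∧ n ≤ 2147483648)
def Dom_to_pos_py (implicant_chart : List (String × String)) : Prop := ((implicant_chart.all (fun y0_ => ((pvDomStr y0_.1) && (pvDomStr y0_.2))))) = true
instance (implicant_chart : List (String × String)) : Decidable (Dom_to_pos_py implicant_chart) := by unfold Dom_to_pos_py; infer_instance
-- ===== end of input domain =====

-- B replaces A's dict of per-column lists by a dict of per-column integer bitmasks
-- (each '1' cell adds 2**row to one integer), expanded into tuples at the end.

-- ===== PORT A =====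
def to_pos_py (implicant_chart : List (String × String)) : List (List Int) :=
  let temp_pos : PySem.Dict Int (List Int) :=
    (PySem.List.enumerate (PySem.Dict.ofList implicant_chart).items).foldl
      (fun d p =>
        (PySem.List.enumerate p.2.2.toList).foldl
          (fun d q =>
            let temp_item : Int := 2 ^ p.1.toNat
            if q.2 = '1' then
              match d.get? q.1 with
              | some l => d.insert q.1 (l ++ [temp_item])
              | none   => d.insert q.1 [temp_item]
            else d) d)
      PySem.Dict.empty
  temp_pos.items.foldl (fun s p => PySem.Set.add s p.2) PySem.Set.empty

-- ===== PORT B =====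
-- the 'while mask: … mask //= 2; p *= 2' loop; the guard is '0 < mask' rather than
-- 'mask ≠ 0' only to make it total (masks here are sums of distinct powers of two, ≥ 1)
def bitsExpand (mask p : Int) : List Int :=
  if _h : 0 < mask then
    (if PySem.Int.mod mask 2 ≠ 0 then [p] else []) ++
      bitsExpand (PySem.Int.floordiv mask 2) (p * 2)
  else []
termination_by mask.toNat
decreasing_by
  rw [PySem.Int.floordiv_eq_ediv_of_pos (by omega : (0:Int) < 2)]; omega

def to_pos_py_alt (implicant_chart : List (String × String)) : List (List Int) :=
  let masks : PySem.Dict Int Int :=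
    (PySem.List.enumerate (PySem.Dict.ofList implicant_chart).values).foldl
      (fun d p =>
        (PySem.List.enumerate p.2.toList).foldl
          (fun d q =>
            if q.2 = '1' then d.insert q.1 (d.getD q.1 0 + 2 ^ p.1.toNat) else d) d)
      PySem.Dict.empty
  masks.values.foldl (fun s m => PySem.Set.add s (bitsExpand m 1)) PySem.Set.empty

-- ===== PRECONDITION & SPEC =====
def Spec_to_pos_py (implicant_chart : List (String × String)) (out : List (List Int)) : Prop := out = to_pos_py_alt implicant_chart
instance (implicant_chart : List (String × String)) (out : List (List Int)) : Decidable (Spec_to_pos_py implicant_chart out) := by unfold Spec_to_pos_py; infer_instance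

-- ===== CLAIM (what is proved, stated in full; the proofs are below) =====
def Claim_equal_to_pos_py : Prop := ∀ (implicant_chart : List (String × String)), Dom_to_pos_py implicant_chart → Spec_to_pos_py implicant_chart (to_pos_py implicant_chart)

-- ===== LEMMAS AND PROOFS =====

-- column indices carrying '1' in one row, in order
def onesRow (row : List Char) : List Int :=
  (PySem.List.enumerate row).filterMap (fun q => if q.2 = '1' then some q.1 else none)

-- (column, 2^row) pairs of the whole chart, in insertion order
def pairsOf (values : List String) : List (Int × Int) :=
  (PySem.List.enumerate values).flatMap
    (fun p => (onesRow p.2.toList).map (fun c => (c, (2 : Int) ^ p.1.toNat)))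

-- the ROW indices whose string has a '1' at column c (strictly increasing)
def esOf (values : List String) (c : Int) : List Nat :=
  ((PySem.List.enumerate values).filter
      (fun p => decide (c < PySem.Str.len p.2 ∧ PySem.Str.pyGet? p.2 c = some '1'))).map
    (fun p => p.1.toNat)

-- the column's tuple as A builds it: powers 2^i over those rows, in row order
def colTupleB (values : List String) (c : Int) : List Int :=
  (esOf values c).map (fun e => (2 : Int) ^ e)

theorem enumerate_map {α β : Type} (f : α → β) (l : List α) (s : Int) :
    PySem.List.enumerate (l.map f) s = (PySem.List.enumerate l s).map (fun p => (p.1, f p.2)) := by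
  induction l generalizing s with
  | nil => simp [PySem.List.enumerate_nil]
  | cons x t ih => simp [PySem.List.enumerate_cons, ih]

theorem nodup_onesRow (row : List Char) : (onesRow row).Nodup := by
  apply List.Nodup.filterMap
  · intro a a' b hb hb'
    simp only [Option.mem_def, Option.ite_none_right_eq_some, Option.some.injEq] at hb hb'
    exact Prod.ext (hb.2.trans hb'.2.symm) (hb.1.trans hb'.1.symm)
  · exact List.Pairwise.imp
      (fun {a b} (h : a.1 < b.1) (he : a = b) => absurd (congrArg Prod.fst he) (ne_of_lt h))
      (PySem.List.pairwise_lt_enumerate row 0)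

theorem mem_onesRow (row : List Char) (c : Int) :
    c ∈ onesRow row ↔ ∃ (k : Nat) (h : k < row.length), row[k] = '1' ∧ c = (k : Int) := by
  unfold onesRow
  simp only [List.mem_filterMap, PySem.List.mem_enumerate_iff]
  constructor
  · rintro ⟨q, ⟨k, hk, rfl⟩, hq⟩
    simp only [Option.ite_none_right_eq_some, Option.some.injEq] at hq
    exact ⟨k, hk, hq.1, by omega⟩
  · rintro ⟨k, hk, h1, rfl⟩
    refine ⟨((k : Int), row[k]), ⟨k, hk, by simp⟩, ?_⟩
    simp [h1]

theorem mem_onesRow_iff_get (row : String) (c : Int) (hc : 0 ≤ c) :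
    c ∈ onesRow row.toList ↔
      (c < PySem.Str.len row ∧ PySem.Str.pyGet? row c = some '1') := by
  rw [mem_onesRow, PySem.Str.len_eq]
  have hcn : c = (c.toNat : Int) := (Int.toNat_of_nonneg hc).symm
  constructor
  · rintro ⟨k, hk, h1, rfl⟩
    refine ⟨by exact_mod_cast hk, ?_⟩
    simp [PySem.Str.pyGet?, PySem.Chars.pyGet?, PySem.List.pyGet?_natCast,
          List.getElem?_eq_getElem hk, h1]
  · rintro ⟨hlt, hget⟩
    refine ⟨c.toNat, by omega, ?_, hcn⟩
    rw [hcn] at hget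
    simp only [PySem.Str.pyGet?, PySem.Chars.pyGet?, PySem.List.pyGet?_natCast] at hget
    obtain ⟨h, he⟩ := List.getElem?_eq_some_iff.mp hget
    exact he

theorem nonneg_of_mem_onesRow (row : List Char) (c : Int) (h : c ∈ onesRow row) : 0 ≤ c := by
  rw [mem_onesRow] at h; obtain ⟨k, _, _, rfl⟩ := h; omega

-- one row's slice of pairsOf, filtered at column c
theorem row_filter_eq (row : String) (w c : Int) (hc : 0 ≤ c) :
    (((onesRow row.toList).map (fun c' => (c', w))).filter (fun p => p.1 == c)).map (fun x => x.2)
      = if c < PySem.Str.len row ∧ PySem.Str.pyGet? row c = some '1' then [w] else [] := by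
  rw [List.filter_map]
  have h1 : ((fun p : Int × Int => p.1 == c) ∘ fun c' => (c', w)) = fun c' => c' == c := rfl
  rw [h1, List.filter_beq]
  by_cases hm : c ∈ onesRow row.toList
  · rw [List.count_eq_one_of_mem (nodup_onesRow _) hm,
        if_pos ((mem_onesRow_iff_get row c hc).mp hm)]
    simp
  · rw [List.count_eq_zero.mpr hm,
        if_neg (fun hcon => hm ((mem_onesRow_iff_get row c hc).mpr hcon))]
    simp

theorem pairs_filter_eq (values : List String) (c : Int) (hc : 0 ≤ c) :
    ((pairsOf values).filter (fun p => p.1 == c)).map (fun x => x.2) = colTupleB values c := by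
  unfold pairsOf colTupleB esOf
  rw [List.map_map]
  generalize (0 : Int) = s
  induction values generalizing s with
  | nil => simp [PySem.List.enumerate_nil]
  | cons row t ih =>
    rw [PySem.List.enumerate_cons]
    simp only [List.flatMap_cons, List.filter_append, List.map_append, List.filter_cons]
    rw [row_filter_eq row _ c hc, ih]
    by_cases hcond : c < PySem.Str.len row ∧ PySem.Str.pyGet? row c = some '1'
    · rw [if_pos hcond, if_pos (decide_eq_true hcond)]
      simp
    · rw [if_neg hcond, if_neg (by simpa using hcond)]
      simp

theorem map_fst_pairsOf (values : List String) :
    (pairsOf values).map (fun p => p.1) = values.flatMap (fun row => onesRow row.toList) := by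
  unfold pairsOf
  rw [List.map_flatMap]
  have h2 : values.flatMap (fun row => onesRow row.toList)
      = ((PySem.List.enumerate values).map (fun p => p.2)).flatMap (fun row => onesRow row.toList) := by
    rw [PySem.List.map_snd_enumerate]
  rw [h2, List.flatMap_map]
  congr 1
  funext p
  simp [Function.comp_def]

-- A's inner loop over one row = fold of modify over that row's (column, weight) pairs
theorem innerA_eq (row : List Char) (w : Int) (d : PySem.Dict Int (List Int)) :
    (PySem.List.enumerate row).foldl
      (fun d q =>
        if q.2 = '1' then
          match d.get? q.1 with
          | some l => d.insert q.1 (l ++ [w])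
          | none   => d.insert q.1 [w]
        else d) d
    = ((onesRow row).map (fun c => (c, w))).foldl
        (fun d p => d.modify p.1 [] (fun v => v ++ [p.2])) d := by
  unfold onesRow
  rw [List.foldl_map, List.foldl_filterMap]
  apply PySem.List.foldl_congr_mem
  intro d q _
  by_cases h : q.2 = '1'
  · simp only [h, if_true]
    cases hg : d.get? q.1 with
    | some l =>
      simp [PySem.Dict.modify, PySem.Dict.getD_eq_get?_getD, hg]
    | none =>
      simp [PySem.Dict.modify, PySem.Dict.getD_eq_get?_getD, hg]
  · simp [h]

-- B's inner loop over one row = fold of insert-add over the same pairs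
theorem innerB_eq (row : List Char) (w : Int) (d : PySem.Dict Int Int) :
    (PySem.List.enumerate row).foldl
      (fun d q => if q.2 = '1' then d.insert q.1 (d.getD q.1 0 + w) else d) d
    = ((onesRow row).map (fun c => (c, w))).foldl
        (fun d p => d.insert p.1 (d.getD p.1 0 + p.2)) d := by
  unfold onesRow
  rw [List.foldl_map, List.foldl_filterMap]
  apply PySem.List.foldl_congr_mem
  intro d q _
  by_cases h : q.2 = '1' <;> simp [h]

-- A's whole accumulation = one modify-fold over the flattened (column, weight) pairs
theorem mainA (values : List String) :
    ((PySem.List.enumerate values).foldl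
      (fun d p =>
        (PySem.List.enumerate p.2.toList).foldl
          (fun d q =>
            let temp_item : Int := 2 ^ p.1.toNat
            if q.2 = '1' then
              match d.get? q.1 with
              | some l => d.insert q.1 (l ++ [temp_item])
              | none   => d.insert q.1 [temp_item]
            else d) d)
      (PySem.Dict.empty : PySem.Dict Int (List Int)))
    = (pairsOf values).foldl (fun d p => d.modify p.1 [] (fun v => v ++ [p.2]))
        PySem.Dict.empty := by
  rw [pairsOf, List.foldl_flatMap]
  apply PySem.List.foldl_congr_mem
  intro d p _
  exact innerA_eq p.2.toList _ d

-- B's whole accumulation = one insert-add-fold over the same pairs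
theorem mainB (values : List String) :
    ((PySem.List.enumerate values).foldl
      (fun d p =>
        (PySem.List.enumerate p.2.toList).foldl
          (fun d q =>
            if q.2 = '1' then d.insert q.1 (d.getD q.1 0 + 2 ^ p.1.toNat) else d) d)
      (PySem.Dict.empty : PySem.Dict Int Int))
    = (pairsOf values).foldl (fun d p => d.insert p.1 (d.getD p.1 0 + p.2))
        PySem.Dict.empty := by
  rw [pairsOf, List.foldl_flatMap]
  apply PySem.List.foldl_congr_mem
  intro d p _
  exact innerB_eq p.2.toList _ d

theorem getD_foldl_insert_sum (l : List (Int × Int)) (d : PySem.Dict Int Int) (c : Int) :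
    (l.foldl (fun d p => d.insert p.1 (d.getD p.1 0 + p.2)) d).getD c 0
      = d.getD c 0 + ((l.filter (fun p => p.1 == c)).map (fun x => x.2)).sum := by
  induction l generalizing d with
  | nil => simp
  | cons p t ih =>
    rw [List.foldl_cons, ih, List.filter_cons]
    by_cases h : p.1 = c
    · simp [h]
      omega
    · have hb : (p.1 == c) = false := by simp [h]
      simp [hb, PySem.Dict.getD_insert, Ne.symm h]

theorem update_nil_eq_ofList (l : List Int) : PySem.Set.update [] l = PySem.Set.ofList l := by
  rw [PySem.Set.ofList_eq_foldl]; rfl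

theorem nonneg_fst_of_mem_enumerate {α : Type} (l : List α) (p : Int × α)
    (h : p ∈ PySem.List.enumerate l 0) : 0 ≤ p.1 := by
  rw [PySem.List.mem_enumerate_iff] at h
  obtain ⟨k, hk, rfl⟩ := h
  simp

theorem pairwise_esOf (values : List String) (c : Int) : (esOf values c).Pairwise (· < ·) := by
  unfold esOf
  rw [List.pairwise_map]
  refine List.Pairwise.imp_of_mem ?_
    ((PySem.List.pairwise_lt_enumerate values 0).filter _)
  intro a b ha hb hab
  have ha0 : 0 ≤ a.1 := nonneg_fst_of_mem_enumerate values a (List.mem_of_mem_filter ha)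
  omega

-- === the bit-expansion lemma ===

theorem shift_sum_len (t : List Nat) (h : ∀ x ∈ t, 1 ≤ x) :
    (t.map (fun e => e - 1)).sum + t.length = t.sum := by
  induction t with
  | nil => simp
  | cons x t ih =>
    have hx := h x (List.mem_cons_self)
    have ht := ih (fun y hy => h y (List.mem_cons_of_mem x hy))
    simp only [List.map_cons, List.sum_cons, List.length_cons]
    omega

theorem sum_pow_shift (t : List Nat) (h : ∀ x ∈ t, 1 ≤ x) :
    (t.map (fun e => (2:Int)^e)).sum
      = 2 * ((t.map (fun e => e - 1)).map (fun e => (2:Int)^e)).sum := by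
  induction t with
  | nil => simp
  | cons x t ih =>
    have hx := h x (List.mem_cons_self)
    have ht := ih (fun y hy => h y (List.mem_cons_of_mem x hy))
    simp only [List.map_cons, List.sum_cons]
    have hxe : (2:Int)^x = 2^(x-1) * 2 := by
      rw [← pow_succ]
      congr 1
      omega
    rw [ht, hxe]
    ring

theorem sum_pow_nonneg (t : List Nat) : 0 ≤ (t.map (fun e => (2:Int)^e)).sum := by
  apply List.sum_nonneg
  intro x hx
  obtain ⟨e, _, rfl⟩ := List.mem_map.mp hx
  positivity

theorem map_shift_pow (p : Int) (l : List Nat) (h : ∀ x ∈ l, 1 ≤ x) :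
    ((l.map (fun e => e - 1)).map (fun e => p * 2 * (2:Int)^e)) = l.map (fun e => p * 2^e) := by
  rw [List.map_map]
  apply List.map_congr_left
  intro x hx
  have hx1 := h x hx
  have hxe : (2:Int)^x = 2^(x-1) * 2 := by
    rw [← pow_succ]; congr 1; omega
  simp only [Function.comp]
  rw [hxe]
  ring

theorem bitsExpand_sum : ∀ (n : Nat) (es : List Nat), es.sum + es.length = n →
    es.Pairwise (· < ·) → ∀ p : Int,
    bitsExpand ((es.map (fun e => (2:Int)^e)).sum) p = es.map (fun e => p * 2^e) := by
  intro n
  induction n using Nat.strong_induction_on with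
  | _ n ih =>
  intro es hn hp p
  match es with
  | [] => rw [bitsExpand]; simp
  | e :: t =>
    obtain ⟨hlt, hpt⟩ := List.pairwise_cons.mp hp
    by_cases he : e = 0
    · subst he
      have ht1 : ∀ x ∈ t, 1 ≤ x := fun x hx => hlt x hx
      have hp' : (t.map (fun e => e - 1)).Pairwise (· < ·) := by
        rw [List.pairwise_map]
        refine List.Pairwise.imp_of_mem ?_ hpt
        intro a b ha hb hab
        have := ht1 a ha
        omega
      have hval : (((0:Nat) :: t).map (fun e => (2:Int)^e)).sum
          = 1 + 2 * ((t.map (fun e => e - 1)).map (fun e => (2:Int)^e)).sum := by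
        simp [sum_pow_shift t ht1]
      have hk0 : 0 ≤ ((t.map (fun e => e - 1)).map (fun e => (2:Int)^e)).sum :=
        sum_pow_nonneg _
      rw [hval, bitsExpand]
      rw [dif_pos (by omega : (0:Int) < 1 + 2 * ((t.map (fun e => e - 1)).map (fun e => (2:Int)^e)).sum)]
      have hmod : PySem.Int.mod (1 + 2 * ((t.map (fun e => e - 1)).map (fun e => (2:Int)^e)).sum) 2 = 1 := by
        rw [PySem.Int.mod_eq_emod_of_pos (by omega)]; omega
      have hdiv : PySem.Int.floordiv (1 + 2 * ((t.map (fun e => e - 1)).map (fun e => (2:Int)^e)).sum) 2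
          = ((t.map (fun e => e - 1)).map (fun e => (2:Int)^e)).sum := by
        rw [PySem.Int.floordiv_eq_ediv_of_pos (by omega)]; omega
      rw [hmod, hdiv]
      have hmeas : (t.map (fun e => e - 1)).sum + (t.map (fun e => e - 1)).length < n := by
        have hms := shift_sum_len t ht1
        simp only [List.sum_cons, List.length_cons] at hn
        simp only [List.length_map]
        omega
      rw [ih _ hmeas (t.map (fun e => e - 1)) rfl hp' (p * 2)]
      simp [map_shift_pow p t ht1]
    · have ht1 : ∀ x ∈ e :: t, 1 ≤ x := by
        intro x hx
        rcases List.mem_cons.mp hx with rfl | hx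
        · omega
        · have := hlt x hx; omega
      have hp' : ((e :: t).map (fun e => e - 1)).Pairwise (· < ·) := by
        rw [List.pairwise_map]
        refine List.Pairwise.imp_of_mem ?_ hp
        intro a b ha hb hab
        have := ht1 a ha
        omega
      have hval := sum_pow_shift (e :: t) ht1
      have hk1 : 1 ≤ (((e :: t).map (fun e => e - 1)).map (fun e => (2:Int)^e)).sum := by
        simp only [List.map_cons, List.sum_cons]
        have h1 : (0:Int) < 2^(e-1) := by positivity
        have h2 := sum_pow_nonneg (t.map (fun e => e - 1))
        omega
      rw [hval, bitsExpand]
      rw [dif_pos (by omega : (0:Int) < 2 * (((e :: t).map (fun e => e - 1)).map (fun e => (2:Int)^e)).sum)]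
      have hmod : PySem.Int.mod (2 * (((e :: t).map (fun e => e - 1)).map (fun e => (2:Int)^e)).sum) 2 = 0 := by
        rw [PySem.Int.mod_eq_emod_of_pos (by omega)]; omega
      have hdiv : PySem.Int.floordiv (2 * (((e :: t).map (fun e => e - 1)).map (fun e => (2:Int)^e)).sum) 2
          = (((e :: t).map (fun e => e - 1)).map (fun e => (2:Int)^e)).sum := by
        rw [PySem.Int.floordiv_eq_ediv_of_pos (by omega)]; omega
      rw [hmod, hdiv]
      have hmeas : ((e :: t).map (fun e => e - 1)).sum + ((e :: t).map (fun e => e - 1)).length < n := by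
        have hms := shift_sum_len (e :: t) ht1
        simp only [List.sum_cons, List.length_cons] at hn hms
        simp only [List.length_map, List.length_cons]
        omega
      rw [ih _ hmeas ((e :: t).map (fun e => e - 1)) rfl hp' (p * 2),
          map_shift_pow p (e :: t) ht1]
      simp

-- === assembly ===

theorem main_eq (values : List String) :
    (((PySem.List.enumerate values).foldl
      (fun d p =>
        (PySem.List.enumerate p.2.toList).foldl
          (fun d q =>
            let temp_item : Int := 2 ^ p.1.toNat
            if q.2 = '1' then
              match d.get? q.1 with
              | some l => d.insert q.1 (l ++ [temp_item])
              | none   => d.insert q.1 [temp_item]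
            else d) d)
      (PySem.Dict.empty : PySem.Dict Int (List Int))).items.foldl
        (fun s p => PySem.Set.add s p.2) PySem.Set.empty)
    = ((PySem.List.enumerate values).foldl
      (fun d p =>
        (PySem.List.enumerate p.2.toList).foldl
          (fun d q =>
            if q.2 = '1' then d.insert q.1 (d.getD q.1 0 + 2 ^ p.1.toNat) else d) d)
      (PySem.Dict.empty : PySem.Dict Int Int)).values.foldl
        (fun s m => PySem.Set.add s (bitsExpand m 1)) PySem.Set.empty := by
  rw [mainA, mainB]
  have hndA : ((pairsOf values).foldl (fun d p => d.modify p.1 [] (fun v => v ++ [p.2]))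
      (PySem.Dict.empty : PySem.Dict Int (List Int))).keys.Nodup :=
    PySem.Dict.nodup_keys_foldl_modify_key _ _ _ _ _ PySem.Dict.nodup_keys_empty
  have hndB : ((pairsOf values).foldl (fun d p => d.insert p.1 (d.getD p.1 0 + p.2))
      (PySem.Dict.empty : PySem.Dict Int Int)).keys.Nodup :=
    PySem.Dict.nodup_keys_foldl_insert_key _ _ _ _ PySem.Dict.nodup_keys_empty
  rw [PySem.Dict.items_eq_map_keys _ hndA [], List.foldl_map,
      PySem.Dict.values_eq_map_keys _ hndB 0, List.foldl_map]
  have hkA : ((pairsOf values).foldl (fun d p => d.modify p.1 [] (fun v => v ++ [p.2]))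
      (PySem.Dict.empty : PySem.Dict Int (List Int))).keys
      = PySem.Set.ofList (values.flatMap (fun row => onesRow row.toList)) := by
    rw [PySem.Dict.keys_foldl_modify_key, PySem.Dict.keys_empty, map_fst_pairsOf,
        update_nil_eq_ofList]
  have hkB : ((pairsOf values).foldl (fun d p => d.insert p.1 (d.getD p.1 0 + p.2))
      (PySem.Dict.empty : PySem.Dict Int Int)).keys
      = PySem.Set.ofList (values.flatMap (fun row => onesRow row.toList)) := by
    rw [PySem.Dict.keys_foldl_insert_key, PySem.Dict.keys_empty, map_fst_pairsOf,
        update_nil_eq_ofList]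
  rw [hkA, hkB]
  have hAside : ∀ (s : PySem.Set (List Int)),
      ∀ c ∈ PySem.Set.ofList (values.flatMap (fun row => onesRow row.toList)),
      PySem.Set.add s
        (((pairsOf values).foldl (fun d p => d.modify p.1 [] (fun v => v ++ [p.2]))
            (PySem.Dict.empty : PySem.Dict Int (List Int))).getD c [])
        = PySem.Set.add s (colTupleB values c) := by
    intro s c hc
    rw [PySem.Set.mem_ofList, List.mem_flatMap] at hc
    obtain ⟨row, _, hcr⟩ := hc
    have hc0 : 0 ≤ c := nonneg_of_mem_onesRow _ _ hcr
    rw [PySem.Dict.getD_foldl_modify_append, PySem.Dict.getD_empty, List.nil_append,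
        pairs_filter_eq values c hc0]
  have hBside : ∀ (s : PySem.Set (List Int)),
      ∀ c ∈ PySem.Set.ofList (values.flatMap (fun row => onesRow row.toList)),
      PySem.Set.add s
        (bitsExpand
          (((pairsOf values).foldl (fun d p => d.insert p.1 (d.getD p.1 0 + p.2))
              (PySem.Dict.empty : PySem.Dict Int Int)).getD c 0) 1)
        = PySem.Set.add s (colTupleB values c) := by
    intro s c hc
    rw [PySem.Set.mem_ofList, List.mem_flatMap] at hc
    obtain ⟨row, _, hcr⟩ := hc
    have hc0 : 0 ≤ c := nonneg_of_mem_onesRow _ _ hcr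
    rw [getD_foldl_insert_sum, PySem.Dict.getD_empty, zero_add,
        pairs_filter_eq values c hc0]
    show PySem.Set.add s (bitsExpand ((colTupleB values c)).sum 1) = _
    unfold colTupleB
    rw [bitsExpand_sum ((esOf values c).sum + (esOf values c).length)
          (esOf values c) rfl (pairwise_esOf values c) 1]
    simp
  rw [PySem.List.foldl_congr_mem _ _ _ _ hAside, PySem.List.foldl_congr_mem _ _ _ _ hBside]

theorem to_pos_py_as_values (chart : List (String × String)) :
    to_pos_py chart
    = (((PySem.List.enumerate ((PySem.Dict.ofList chart).values)).foldl
        (fun d p =>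
          (PySem.List.enumerate p.2.toList).foldl
            (fun d q =>
              let temp_item : Int := 2 ^ p.1.toNat
              if q.2 = '1' then
                match d.get? q.1 with
                | some l => d.insert q.1 (l ++ [temp_item])
                | none   => d.insert q.1 [temp_item]
              else d) d)
        (PySem.Dict.empty : PySem.Dict Int (List Int))).items.foldl
          (fun s p => PySem.Set.add s p.2) PySem.Set.empty) := by
  unfold to_pos_py
  rw [show (PySem.Dict.ofList chart).values
        = (PySem.Dict.ofList chart).items.map (fun p => p.2) from rfl,
      enumerate_map, List.foldl_map]

-- ===== VERDICT (by name: the statement is the Claim_ definition above) =====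
theorem to_pos_py_spec : Claim_equal_to_pos_py := by
  intro chart _
  show to_pos_py chart = to_pos_py_alt chart
  rw [to_pos_py_as_values chart, to_pos_py_alt]
  exact main_eq ((PySem.Dict.ofList chart).values)
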